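-- pv_equiv track=rewrite | github.com/Aviral-hub4169/BILL2 | billing/views.py | _number_to_words_indian
-- ===== SOURCE A (Python) =====
-- def _two_digit_words(number):
--     ones = [
--         'Zero',
--         'One',
--         'Two',
--         'Three',
--         'Four',
--         'Five',
--         'Six',
--         'Seven',
--         'Eight',
--         'Nine',
--         'Ten',
--         'Eleven',
--         'Twelve',
--         'Thirteen',
--         'Fourteen',
--         'Fifteen',
--         'Sixteen',
--         'Seventeen',
--         'Eighteen',
--         'Nineteen',
--     ]
--     tens = ['', '', 'Twenty', 'Thirty', 'Forty', 'Fifty', 'Sixty', 'Seventy', 'Eighty', 'Ninety']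
--     if number < 20:
--         return ones[number]
--     ten = number // 10
--     unit = number % 10
--     if unit == 0:
--         return tens[ten]
--     return f'{tens[ten]} {ones[unit]}'
--
-- def _number_to_words_indian(number):
--     number = int(number)
--     if number == 0:
--         return 'Zero'
--
--     parts = []
--
--     crore = number // 10000000
--     if crore:
--         parts.append(f'{_number_to_words_indian(crore)} Crore')
--     number %= 10000000
--
--     lakh = number // 100000
--     if lakh:
--         parts.append(f'{_number_to_words_indian(lakh)} Lakh')
--     number %= 100000
--
--     thousand = number // 1000
--     if thousand:
--         parts.append(f'{_number_to_words_indian(thousand)} Thousand')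
--     number %= 1000
--
--     hundred = number // 100
--     if hundred:
--         parts.append(f'{_two_digit_words(hundred)} Hundred')
--     number %= 100
--
--     if number:
--         parts.append(_two_digit_words(number))
--
--     return ' '.join(parts)
-- ===== SOURCE B (Python) =====
-- def _two_digit_words(number):
--     ones = [
--         'Zero', 'One', 'Two', 'Three', 'Four', 'Five', 'Six', 'Seven',
--         'Eight', 'Nine', 'Ten', 'Eleven', 'Twelve', 'Thirteen', 'Fourteen',
--         'Fifteen', 'Sixteen', 'Seventeen', 'Eighteen', 'Nineteen',
--     ]
--     tens = ['', '', 'Twenty', 'Thirty', 'Forty', 'Fifty', 'Sixty', 'Seventy', 'Eighty', 'Ninety']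
--     if number < 20:
--         return ones[number]
--     ten = number // 10
--     unit = number % 10
--     if unit == 0:
--         return tens[ten]
--     return f'{tens[ten]} {ones[unit]}'
--
-- _SCALES = ((10000000, 'Crore'), (100000, 'Lakh'), (1000, 'Thousand'), (100, 'Hundred'))
--
-- def _number_to_words_indian(number):
--     number = int(number)
--     if number == 0:
--         return 'Zero'
--     if number < 100:
--         return _two_digit_words(number)
--     for d, name in _SCALES:
--         if number >= d:
--             q, r = divmod(number, d)
--             head = _number_to_words_indian(q) + ' ' + name
--             return head if r == 0 else head + ' ' + _number_to_words_indian(r)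
-- ===== Notes on version B (the rewrite author's own statement) =====
-- stated objective: simpler
-- what changed: Replaced the sequential parts-list accumulation (divide/mod at each of four fixed scales, then ' '.join) by a single recursion on the largest applicable scale from a table, threading the remainder through the recursion.
import Mathlib
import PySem

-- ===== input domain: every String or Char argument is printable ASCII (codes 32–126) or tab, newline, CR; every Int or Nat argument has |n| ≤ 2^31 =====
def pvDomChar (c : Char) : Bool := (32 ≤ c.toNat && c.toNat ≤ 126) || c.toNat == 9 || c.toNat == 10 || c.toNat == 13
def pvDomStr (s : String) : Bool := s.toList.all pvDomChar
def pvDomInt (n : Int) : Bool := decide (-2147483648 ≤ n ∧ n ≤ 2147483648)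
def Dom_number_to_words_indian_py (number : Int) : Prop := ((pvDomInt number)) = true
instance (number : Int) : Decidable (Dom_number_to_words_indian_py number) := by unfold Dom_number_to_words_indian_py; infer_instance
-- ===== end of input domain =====

-- B replaces A's sequential parts-list accumulation (divide/mod at each fixed scale, then ' '.join)
-- by a single recursion on the largest applicable scale from a table, threading the remainder
-- through the recursion (objective: simpler).

-- ===== PORT A =====
-- shared module helper _two_digit_words; list indexing via PySem.List.pyGet? (exact, incl. negative
-- wraparound); .getD "" is hit only where Python would raise IndexError (never under Pre_).
def pyTwoDigitWords (number : Int) : String :=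
  let ones : List String := ["Zero", "One", "Two", "Three", "Four", "Five", "Six", "Seven",
    "Eight", "Nine", "Ten", "Eleven", "Twelve", "Thirteen", "Fourteen", "Fifteen", "Sixteen",
    "Seventeen", "Eighteen", "Nineteen"]
  let tens : List String := ["", "", "Twenty", "Thirty", "Forty", "Fifty", "Sixty", "Seventy",
    "Eighty", "Ninety"]
  if number < 20 then (PySem.List.pyGet? ones number).getD ""
  else
    let ten := PySem.Int.floordiv number 10
    let unit := PySem.Int.mod number 10
    if unit = 0 then (PySem.List.pyGet? tens ten).getD ""
    else ((PySem.List.pyGet? tens ten).getD "") ++ " " ++ ((PySem.List.pyGet? ones unit).getD "")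

-- A's body for a nonnegative argument (Python divisions on Nat coincide with //, %).
def ntwiA (n : Nat) : String :=
  if n = 0 then "Zero"
  else
    let crore := n / 10000000
    let p1 : List String := if _h : crore ≠ 0 then [ntwiA crore ++ " Crore"] else []
    let n1 := n % 10000000
    let lakh := n1 / 100000
    let p2 : List String := if _h : lakh ≠ 0 then p1 ++ [ntwiA lakh ++ " Lakh"] else p1
    let n2 := n1 % 100000
    let thousand := n2 / 1000
    let p3 : List String := if _h : thousand ≠ 0 then p2 ++ [ntwiA thousand ++ " Thousand"] else p2
    let n3 := n2 % 1000
    let hundred := n3 / 100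
    let p4 : List String := if hundred ≠ 0 then p3 ++ [pyTwoDigitWords (hundred : Int) ++ " Hundred"] else p3
    let n4 := n3 % 100
    let p5 : List String := if n4 ≠ 0 then p4 ++ [pyTwoDigitWords (n4 : Int)] else p4
    PySem.Str.join " " p5
termination_by n
decreasing_by all_goals omega

-- int(number) is the identity on int; for number < 0 the Python function never returns
-- (infinite recursion on crore = -1, RecursionError) — excluded by Pre_, port returns "" there.
def number_to_words_indian_py (number : Int) : String :=
  if number < 0 then "" else ntwiA number.toNat

-- ===== PORT B =====
def pvScales : List (Nat × String) :=
  [(10000000, "Crore"), (100000, "Lakh"), (1000, "Thousand"), (100, "Hundred")]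

-- B's body for a nonnegative argument: first scale the number reaches, recurse on quotient and rest.
def ntwiB (n : Nat) : String :=
  if n = 0 then "Zero"
  else if n < 100 then pyTwoDigitWords (n : Int)
  else
    match h : pvScales.find? (fun p => decide (p.1 ≤ n)) with
    | some (d, name) =>
      let q := n / d
      let r := n % d
      let head := ntwiB q ++ " " ++ name
      if r = 0 then head else head ++ " " ++ ntwiB r
    | none => ""    -- unreachable: the last scale is 100 ≤ n
termination_by n
decreasing_by
  · have hm := List.mem_of_find?_eq_some h
    have hd : 100 ≤ d := by
      simp only [pvScales, List.mem_cons, List.not_mem_nil, or_false, Prod.mk.injEq] at hm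
      rcases hm with ⟨h1, _⟩ | ⟨h1, _⟩ | ⟨h1, _⟩ | ⟨h1, _⟩ <;> omega
    exact Nat.div_lt_self (by omega) (by omega)
  · have hm := List.mem_of_find?_eq_some h
    have hd : 100 ≤ d := by
      simp only [pvScales, List.mem_cons, List.not_mem_nil, or_false, Prod.mk.injEq] at hm
      rcases hm with ⟨h1, _⟩ | ⟨h1, _⟩ | ⟨h1, _⟩ | ⟨h1, _⟩ <;> omega
    have hp := List.find?_some h
    simp only [decide_eq_true_eq] at hp
    have h1 : n % d < d := Nat.mod_lt n (by omega)
    omega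

-- for number < 0 Python B takes the number < 100 branch and calls _two_digit_words(number).
def number_to_words_indian_py_alt (number : Int) : String :=
  if number < 0 then pyTwoDigitWords number else ntwiB number.toNat

-- ===== PRECONDITION & SPEC =====
-- Pre_ excludes exactly the negative inputs, on which Python A recurses forever (RecursionError).
def Pre_number_to_words_indian_py (number : Int) : Prop := 0 ≤ number
instance (number : Int) : Decidable (Pre_number_to_words_indian_py number) := by
  unfold Pre_number_to_words_indian_py; infer_instance
def pvWitness_number_to_words_indian_py : Int := (123456789)

def Spec_number_to_words_indian_py (number : Int) (out : String) : Prop := out = number_to_words_indian_py_alt number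
instance (number : Int) (out : String) : Decidable (Spec_number_to_words_indian_py number out) := by unfold Spec_number_to_words_indian_py; infer_instance

-- ===== CLAIM (what is proved, stated in full; the proofs are below) =====
def Claim_equal_number_to_words_indian_py : Prop := ∀ (number : Int), Dom_number_to_words_indian_py number → Pre_number_to_words_indian_py number → Spec_number_to_words_indian_py number (number_to_words_indian_py number)

-- ===== LEMMAS AND PROOFS =====

-- A's parts list, written with the sequential remainders threaded explicitly.
def pvPu (m : Nat) : List String := if m ≠ 0 then [pyTwoDigitWords (m : Int)] else []
def pvPh (m : Nat) : List String :=
  (if m / 100 ≠ 0 then [pyTwoDigitWords ((m / 100 : Nat) : Int) ++ " Hundred"] else []) ++ pvPu (m % 100)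
def pvPt (m : Nat) : List String :=
  (if m / 1000 ≠ 0 then [ntwiA (m / 1000) ++ " Thousand"] else []) ++ pvPh (m % 1000)
def pvPl (m : Nat) : List String :=
  (if m / 100000 ≠ 0 then [ntwiA (m / 100000) ++ " Lakh"] else []) ++ pvPt (m % 100000)
def pvParts (n : Nat) : List String :=
  (if n / 10000000 ≠ 0 then [ntwiA (n / 10000000) ++ " Crore"] else []) ++ pvPl (n % 10000000)

lemma ntwiA_eq (n : Nat) :
    ntwiA n = if n = 0 then "Zero" else PySem.Str.join " " (pvParts n) := by
  rw [ntwiA]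
  by_cases h0 : n = 0
  · simp [h0]
  · simp only [h0, if_false, dite_eq_ite, pvParts, pvPl, pvPt, pvPh, pvPu]
    split_ifs <;> simp

lemma join_single (x : String) : PySem.Str.join " " [x] = x := by
  apply String.toList_inj.mp
  simp [PySem.Str.toList_join, PySem.Chars.join_singleton]

lemma join_cons (x : String) (Q : List String) (h : Q ≠ []) :
    PySem.Str.join " " (x :: Q) = x ++ " " ++ PySem.Str.join " " Q := by
  cases Q with
  | nil => exact absurd rfl h
  | cons y ys =>
    apply String.toList_inj.mp
    simp [PySem.Str.toList_join, PySem.Chars.join_cons_cons]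

lemma pvPh_ne_nil (m : Nat) (h : m ≠ 0) : pvPh m ≠ [] := by
  unfold pvPh pvPu; split_ifs <;> simp_all <;> omega

lemma pvPt_ne_nil (m : Nat) (h : m ≠ 0) : pvPt m ≠ [] := by
  unfold pvPt
  by_cases ht : m / 1000 ≠ 0
  · simp [ht]
  · have := pvPh_ne_nil (m % 1000) (by omega)
    simp [ht, this]

lemma pvPl_ne_nil (m : Nat) (h : m ≠ 0) : pvPl m ≠ [] := by
  unfold pvPl
  by_cases hl : m / 100000 ≠ 0
  · simp [hl]
  · have := pvPt_ne_nil (m % 100000) (by omega)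
    simp [hl, this]

lemma pvPu_zero : pvPu 0 = [] := by simp [pvPu]
lemma pvPh_zero : pvPh 0 = [] := by simp [pvPh, pvPu]
lemma pvPt_zero : pvPt 0 = [] := by simp [pvPt, pvPh, pvPu]
lemma pvPl_zero : pvPl 0 = [] := by simp [pvPl, pvPt, pvPh, pvPu]

-- A's value at a nonzero remainder is the join of the matching parts tail.
lemma ntwiA_eq_join_pvPl (m : Nat) (hm : m < 10000000) :
    ntwiA m = if m = 0 then "Zero" else PySem.Str.join " " (pvPl m) := by
  rw [ntwiA_eq]
  by_cases h0 : m = 0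
  · simp [h0]
  · simp [h0, pvParts, Nat.div_eq_of_lt hm, Nat.mod_eq_of_lt hm]

lemma ntwiA_eq_join_pvPt (m : Nat) (hm : m < 100000) :
    ntwiA m = if m = 0 then "Zero" else PySem.Str.join " " (pvPt m) := by
  rw [ntwiA_eq_join_pvPl m (by omega)]
  by_cases h0 : m = 0
  · simp [h0]
  · simp [h0, pvPl, Nat.div_eq_of_lt hm, Nat.mod_eq_of_lt hm]

lemma ntwiA_eq_join_pvPh (m : Nat) (hm : m < 1000) :
    ntwiA m = if m = 0 then "Zero" else PySem.Str.join " " (pvPh m) := by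
  rw [ntwiA_eq_join_pvPt m (by omega)]
  by_cases h0 : m = 0
  · simp [h0]
  · simp [h0, pvPt, Nat.div_eq_of_lt hm, Nat.mod_eq_of_lt hm]

-- evaluation of B's scale scan in each range
lemma find_crore (n : Nat) (h : 10000000 ≤ n) :
    pvScales.find? (fun p => decide (p.1 ≤ n)) = some (10000000, "Crore") := by
  simp [pvScales, List.find?, h]

lemma find_lakh (n : Nat) (h1 : 100000 ≤ n) (h2 : n < 10000000) :
    pvScales.find? (fun p => decide (p.1 ≤ n)) = some (100000, "Lakh") := by
  simp [pvScales, List.find?, h1, Nat.not_le.mpr h2]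

lemma find_thousand (n : Nat) (h1 : 1000 ≤ n) (h2 : n < 100000) :
    pvScales.find? (fun p => decide (p.1 ≤ n)) = some (1000, "Thousand") := by
  simp [pvScales, List.find?, h1, Nat.not_le.mpr h2, Nat.not_le.mpr (by omega : n < 10000000)]

lemma find_hundred (n : Nat) (h1 : 100 ≤ n) (h2 : n < 1000) :
    pvScales.find? (fun p => decide (p.1 ≤ n)) = some (100, "Hundred") := by
  simp [pvScales, List.find?, h1, Nat.not_le.mpr h2, Nat.not_le.mpr (by omega : n < 100000),
    Nat.not_le.mpr (by omega : n < 10000000)]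

lemma append_word (a w : String) (sw : String) (h : sw.toList = " ".toList ++ w.toList) :
    a ++ sw = a ++ " " ++ w := by
  apply String.toList_inj.mp
  simp [h]

-- unfold ntwiB at a matched scale
lemma ntwiB_scale (n d : Nat) (name : String)
    (hfind : pvScales.find? (fun p => decide (p.1 ≤ n)) = some (d, name))
    (h0 : ¬ n = 0) (h100 : ¬ n < 100) :
    ntwiB n = if n % d = 0 then ntwiB (n / d) ++ " " ++ name
              else ntwiB (n / d) ++ " " ++ name ++ " " ++ ntwiB (n % d) := by
  rw [ntwiB]
  simp only [h0, if_false, h100, if_false]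
  split
  next d' name' h' =>
    rw [hfind] at h'
    cases h'
    rfl
  next h' => rw [hfind] at h'; cases h'

lemma ntwiB_small (n : Nat) (h0 : ¬ n = 0) (h100 : n < 100) :
    ntwiB n = pyTwoDigitWords (n : Int) := by
  rw [ntwiB]
  simp [h0, h100]

lemma ntwiA_eq_ntwiB (n : Nat) : ntwiA n = ntwiB n := by
  induction n using Nat.strong_induction_on with
  | _ n ih =>
    by_cases h0 : n = 0
    · rw [ntwiA_eq, if_pos h0, ntwiB, if_pos h0]
    by_cases h100 : n < 100
    · rw [ntwiA_eq_join_pvPh n (by omega), if_neg h0, ntwiB_small n h0 h100,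
        pvPh, if_neg (by omega), List.nil_append, Nat.mod_eq_of_lt h100, pvPu, if_pos h0,
        join_single]
    by_cases hC : 10000000 ≤ n
    · -- Crore
      have hq : ntwiA (n / 10000000) = ntwiB (n / 10000000) :=
        ih _ (Nat.div_lt_self (by omega) (by omega))
      have hr : ntwiA (n % 10000000) = ntwiB (n % 10000000) := ih _ (by omega)
      have hcne : n / 10000000 ≠ 0 := by omega
      have hA : pvParts n = (ntwiA (n / 10000000) ++ " Crore") :: pvPl (n % 10000000) := by
        rw [pvParts, if_pos hcne]; rfl
      rw [ntwiA_eq, if_neg h0, hA, ntwiB_scale n 10000000 "Crore" (find_crore n hC) h0 (by omega)]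
      by_cases hrz : n % 10000000 = 0
      · rw [if_pos hrz, hrz, pvPl_zero, join_single, hq,
          append_word _ "Crore" " Crore" (by decide)]
      · have hrj : PySem.Str.join " " (pvPl (n % 10000000)) = ntwiB (n % 10000000) := by
          rw [← hr, ntwiA_eq_join_pvPl (n % 10000000) (by omega), if_neg hrz]
        rw [if_neg hrz, join_cons _ _ (pvPl_ne_nil _ hrz), hrj, hq,
          append_word _ "Crore" " Crore" (by decide)]
    by_cases hL : 100000 ≤ n
    · -- Lakh
      have hq : ntwiA (n / 100000) = ntwiB (n / 100000) :=
        ih _ (Nat.div_lt_self (by omega) (by omega))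
      have hr : ntwiA (n % 100000) = ntwiB (n % 100000) := ih _ (by omega)
      have hlne : n / 100000 ≠ 0 := by omega
      have hA : pvPl n = (ntwiA (n / 100000) ++ " Lakh") :: pvPt (n % 100000) := by
        rw [pvPl, if_pos hlne]; rfl
      rw [ntwiA_eq_join_pvPl n (by omega), if_neg h0, hA,
        ntwiB_scale n 100000 "Lakh" (find_lakh n hL (by omega)) h0 (by omega)]
      by_cases hrz : n % 100000 = 0
      · rw [if_pos hrz, hrz, pvPt_zero, join_single, hq,
          append_word _ "Lakh" " Lakh" (by decide)]
      · have hrj : PySem.Str.join " " (pvPt (n % 100000)) = ntwiB (n % 100000) := by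
          rw [← hr, ntwiA_eq_join_pvPt (n % 100000) (by omega), if_neg hrz]
        rw [if_neg hrz, join_cons _ _ (pvPt_ne_nil _ hrz), hrj, hq,
          append_word _ "Lakh" " Lakh" (by decide)]
    by_cases hT : 1000 ≤ n
    · -- Thousand
      have hq : ntwiA (n / 1000) = ntwiB (n / 1000) :=
        ih _ (Nat.div_lt_self (by omega) (by omega))
      have hr : ntwiA (n % 1000) = ntwiB (n % 1000) := ih _ (by omega)
      have htne : n / 1000 ≠ 0 := by omega
      have hA : pvPt n = (ntwiA (n / 1000) ++ " Thousand") :: pvPh (n % 1000) := by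
        rw [pvPt, if_pos htne]; rfl
      rw [ntwiA_eq_join_pvPt n (by omega), if_neg h0, hA,
        ntwiB_scale n 1000 "Thousand" (find_thousand n hT (by omega)) h0 (by omega)]
      by_cases hrz : n % 1000 = 0
      · rw [if_pos hrz, hrz, pvPh_zero, join_single, hq,
          append_word _ "Thousand" " Thousand" (by decide)]
      · have hrj : PySem.Str.join " " (pvPh (n % 1000)) = ntwiB (n % 1000) := by
          rw [← hr, ntwiA_eq_join_pvPh (n % 1000) (by omega), if_neg hrz]
        rw [if_neg hrz, join_cons _ _ (pvPh_ne_nil _ hrz), hrj, hq,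
          append_word _ "Thousand" " Thousand" (by decide)]
    · -- Hundred: 100 ≤ n < 1000
      have hhne : n / 100 ≠ 0 := by omega
      have hqB : ntwiB (n / 100) = pyTwoDigitWords ((n / 100 : Nat) : Int) :=
        ntwiB_small _ (by omega) (by omega)
      have hA : pvPh n = (pyTwoDigitWords ((n / 100 : Nat) : Int) ++ " Hundred") :: pvPu (n % 100) := by
        rw [pvPh, if_pos hhne]; rfl
      rw [ntwiA_eq_join_pvPh n (by omega), if_neg h0, hA,
        ntwiB_scale n 100 "Hundred" (find_hundred n (by omega) (by omega)) h0 (by omega)]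
      by_cases hrz : n % 100 = 0
      · rw [if_pos hrz, hrz, pvPu_zero, join_single, hqB,
          append_word _ "Hundred" " Hundred" (by decide)]
      · have hrB : ntwiB (n % 100) = pyTwoDigitWords ((n % 100 : Nat) : Int) :=
          ntwiB_small _ hrz (by omega)
        rw [if_neg hrz, join_cons _ _ (by rw [pvPu, if_pos hrz]; simp), pvPu, if_pos hrz,
          join_single, hrB, hqB, append_word _ "Hundred" " Hundred" (by decide)]

-- ===== VERDICT (by name: the statement is the Claim_ definition above) =====
theorem number_to_words_indian_py_spec : Claim_equal_number_to_words_indian_py := by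
  intro number _ hpre
  unfold Spec_number_to_words_indian_py number_to_words_indian_py number_to_words_indian_py_alt
  rw [if_neg (not_lt.mpr hpre), if_neg (not_lt.mpr hpre)]
  exact ntwiA_eq_ntwiB number.toNat
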